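-- pv_equiv track=rewrite | github.com/SaraSamreen/INNOVA | backend/avatar-server.py | has_stage_directions
-- ===== SOURCE A (Python) =====
-- def has_stage_directions(text):
--     """
--     Check if text contains stage directions or screenplay elements
--     Returns True if stage directions detected
--     """
--     stage_direction_indicators = [
--         'enters', 'exits', 'walks', 'runs', 'sits', 'stands',
--         'camera', 'zoom', 'pan', 'close-up', 'wide shot',
--         'fade in', 'fade out', 'cut to', 'dissolve',
--         'scene opens', 'actor picks up', 'character',
--         'on screen', 'in frame', 'off camera',
--         'voice over', 'v.o.', 'o.s.',
--     ]
--
--     text_lower = text.lower()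
--
--     # Check for common stage direction patterns
--     for indicator in stage_direction_indicators:
--         if indicator in text_lower:
--             return True
--
--     # Check for bracketed content (usually stage directions)
--     if '[' in text or ']' in text:
--         return True
--
--     return False
-- ===== SOURCE B (Python) =====
-- _STAGE_INDICATORS = [
--     'enters', 'exits', 'walks', 'runs', 'sits', 'stands',
--     'camera', 'zoom', 'pan', 'close-up', 'wide shot',
--     'fade in', 'fade out', 'cut to', 'dissolve',
--     'scene opens', 'actor picks up', 'character',
--     'on screen', 'in frame', 'off camera',
--     'voice over', 'v.o.', 'o.s.',
-- ]
--
--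
-- def has_stage_directions(text):
--     """Single left-to-right scan over the positions of the text: at each
--     position report True on a bracket character or on an indicator starting
--     there (case-insensitively)."""
--     low = text.lower()
--     for i, ch in enumerate(text):
--         if ch == '[' or ch == ']':
--             return True
--         if any(low.startswith(ind, i) for ind in _STAGE_INDICATORS):
--             return True
--     return False
-- ===== Notes on version B (the rewrite author's own statement) =====
-- stated objective: alternative
-- what changed: Replaces A's sequence of per-indicator substring scans over the lowered text plus a separate bracket membership pass with a single left-to-right positional scan that, at each position, checks for a bracket character or for any indicator starting there (case-insensitively).
import Mathlib
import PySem

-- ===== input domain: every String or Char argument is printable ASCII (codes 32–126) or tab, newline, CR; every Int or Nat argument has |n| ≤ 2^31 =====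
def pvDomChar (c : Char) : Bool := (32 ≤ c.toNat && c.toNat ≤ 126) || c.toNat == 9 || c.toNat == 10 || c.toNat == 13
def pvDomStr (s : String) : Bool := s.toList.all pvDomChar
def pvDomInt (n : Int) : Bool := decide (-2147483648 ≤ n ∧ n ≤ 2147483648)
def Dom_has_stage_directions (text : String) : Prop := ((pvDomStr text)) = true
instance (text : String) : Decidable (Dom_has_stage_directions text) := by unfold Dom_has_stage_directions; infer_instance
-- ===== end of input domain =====

-- B replaces A's per-indicator substring scans (plus a separate bracket pass) by ONE
-- left-to-right positional scan that checks, at each position, for a bracket character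
-- or an indicator starting there (objective: alternative algorithm, same asymptotic cost).

-- the shared literal list of stage-direction indicators (same data in A and B)
def stageIndicators : List String :=
  ["enters", "exits", "walks", "runs", "sits", "stands",
   "camera", "zoom", "pan", "close-up", "wide shot",
   "fade in", "fade out", "cut to", "dissolve",
   "scene opens", "actor picks up", "character",
   "on screen", "in frame", "off camera",
   "voice over", "v.o.", "o.s."]

-- ===== PORT A =====
def has_stage_directions (text : String) : Bool :=
  let text_lower := PySem.Str.lower text
  -- 'for indicator in …: if indicator in text_lower: return True'
  if stageIndicators.any (fun indicator => PySem.Str.isIn indicator text_lower) then true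
  else if PySem.Str.isIn "[" text || PySem.Str.isIn "]" text then true
  else false

-- ===== PORT B =====
-- the positional scan of Source B: walk the original chars and the lowered chars in lockstep
def altScan (inds : List (List Char)) : List Char → List Char → Bool
  | c :: os, l :: ls =>
      (c == '[' || c == ']')
      || inds.any (fun ind => ind.isPrefixOf (l :: ls))
      || altScan inds os ls
  | _, _ => false

def has_stage_directions_alt (text : String) : Bool :=
  altScan (stageIndicators.map String.toList) text.toList (PySem.Chars.lower text.toList)

-- ===== PRECONDITION & SPEC =====
def Spec_has_stage_directions (text : String) (out : Bool) : Prop := out = has_stage_directions_alt text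
instance (text : String) (out : Bool) : Decidable (Spec_has_stage_directions text out) := by unfold Spec_has_stage_directions; infer_instance

-- ===== CLAIM (what is proved, stated in full; the proofs are below) =====
def Claim_equal_has_stage_directions : Prop := ∀ (text : String), Dom_has_stage_directions text → Spec_has_stage_directions text (has_stage_directions text)

-- ===== LEMMAS AND PROOFS =====

-- what the positional scan computes, for any indicator list without empty words
theorem altScan_eq_true_iff (inds : List (List Char))
    (hne : ∀ ind ∈ inds, ind ≠ []) :
    ∀ (orig low : List Char), orig.length = low.length →
    (altScan inds orig low = true ↔
      (∃ c ∈ orig, c = '[' ∨ c = ']') ∨ ∃ ind ∈ inds, ind <:+: low) := by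
  intro orig
  induction orig with
  | nil =>
      intro low hlen
      have : low = [] := by
        cases low with
        | nil => rfl
        | cons l ls => simp at hlen
      subst this
      simp [altScan, List.infix_nil]
      intro h
      exact hne [] h rfl
  | cons c os ih =>
      intro low hlen
      cases low with
      | nil => simp at hlen
      | cons l ls =>
          have hlen' : os.length = ls.length := by simpa using hlen
          simp only [altScan, Bool.or_eq_true, beq_iff_eq, List.any_eq_true,
            List.isPrefixOf_iff_prefix, ih ls hlen', List.mem_cons, List.infix_cons_iff]
          aesop

-- no indicator is the empty word
theorem stageIndicators_ne_nil : ∀ ind ∈ stageIndicators.map String.toList, ind ≠ [] := by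
  decide

-- lowering preserves length
theorem length_lower (s : List Char) : (PySem.Chars.lower s).length = s.length := by
  simp [PySem.Chars.lower]

-- what port A computes
theorem portA_eq_true_iff (text : String) :
    has_stage_directions text = true ↔
      (∃ ind ∈ stageIndicators, ind.toList <:+: PySem.Chars.lower text.toList) ∨
      ('[' ∈ text.toList ∨ ']' ∈ text.toList) := by
  simp only [has_stage_directions]
  split_ifs with h1 h2
  · simp only [List.any_eq_true, PySem.Str.isIn_iff_infix] at h1
    simp only [true_iff]
    exact Or.inl (by simpa [PySem.Str.lower] using h1)
  · simp only [Bool.or_eq_true, PySem.Str.isIn_iff_infix] at h2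
    simp only [true_iff]
    refine Or.inr ?_
    rcases h2 with h | h
    · exact Or.inl ((List.singleton_infix_iff _ _).mp (by simpa using h))
    · exact Or.inr ((List.singleton_infix_iff _ _).mp (by simpa using h))
  · simp only [List.any_eq_true, PySem.Str.isIn_iff_infix, not_exists, not_and] at h1
    simp only [Bool.or_eq_true, PySem.Str.isIn_iff_infix, not_or] at h2
    simp only [false_iff, not_or]
    refine ⟨?_, ?_, ?_⟩
    · rintro ⟨ind, hind, hinf⟩
      exact h1 ind hind (by simpa [PySem.Str.lower] using hinf)
    · intro hmem
      exact h2.1 (by simpa using (List.singleton_infix_iff _ _).mpr hmem)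
    · intro hmem
      exact h2.2 (by simpa using (List.singleton_infix_iff _ _).mpr hmem)

-- ===== VERDICT (by name: the statement is the Claim_ definition above) =====
theorem has_stage_directions_spec : Claim_equal_has_stage_directions := by
  intro text _
  unfold Spec_has_stage_directions
  have hB := altScan_eq_true_iff (stageIndicators.map String.toList) stageIndicators_ne_nil
    text.toList (PySem.Chars.lower text.toList) (by rw [length_lower])
  rw [Bool.eq_iff_iff, portA_eq_true_iff, has_stage_directions_alt, hB]
  constructor
  · rintro (⟨ind, hind, hinf⟩ | (h | h))
    · exact Or.inr ⟨ind.toList, List.mem_map_of_mem hind, hinf⟩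
    · exact Or.inl ⟨'[', h, Or.inl rfl⟩
    · exact Or.inl ⟨']', h, Or.inr rfl⟩
  · rintro (⟨c, hc, (rfl | rfl)⟩ | ⟨ind, hind, hinf⟩)
    · exact Or.inr (Or.inl hc)
    · exact Or.inr (Or.inr hc)
    · rcases List.mem_map.mp hind with ⟨s, hs, rfl⟩
      exact Or.inl ⟨s, hs, hinf⟩
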